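-- pv_equiv track=rewrite | github.com/AqibNiazi/advent-of-code-2025 | Day_2/task_1.py | sum_double_numbers_in_range
-- ===== SOURCE A (Python) =====
-- def sum_double_numbers_in_range(a: int, b: int) -> int:
--     """
--     Sum all numbers n in [a, b] that are of the form XX,
--     where X is a k-digit number without leading zeros (k >= 1).
--     Representation: n = X * (10^k + 1).
--     """
--     total = 0
--     len_b = len(str(b))
--     max_k = len_b // 2  # maximum possible k based on digit length of b
--
--     for k in range(1, max_k + 1):
--         M = 10**k + 1  # multiplier for constructing XX
--
--         # Bounds for X based on range constraints
--         x_min_val = -(-a // M)       # ceil(a / M)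
--         x_max_val = b // M           # floor(b / M)
--
--         # Bounds for X based on digit length (k-digit, no leading zeros)
--         x_min_digits = 10**(k - 1)
--         x_max_digits = 10**k - 1
--
--         # Final valid range for X
--         low = max(x_min_val, x_min_digits)
--         high = min(x_max_val, x_max_digits)
--
--         if low <= high:
--             count = high - low + 1
--             # Arithmetic series sum of X values
--             sum_X = (low + high) * count // 2
--             total += sum_X * M
--
--     return total
-- ===== SOURCE B (Python) =====
-- def sum_double_numbers_in_range(a: int, b: int) -> int:
--     # Directly enumerate every XX-form candidate n = x * (10**k + 1) with
--     # k-digit x (no leading zeros), for growing k while the smallest such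
--     # candidate still fits below b, and add those that land in [a, b].
--     total = 0
--     k = 1
--     while 10 ** (k - 1) * (10 ** k + 1) <= b:
--         m = 10 ** k + 1
--         for x in range(10 ** (k - 1), 10 ** k):
--             n = x * m
--             if a <= n <= b:
--                 total += n
--         k += 1
--     return total
-- ===== Notes on version B (the rewrite author's own statement) =====
-- stated objective: alternative
-- what changed: Replaces A's string-length-bounded loop of closed-form arithmetic-series sums (with ceil/floor clamping) by direct enumeration of every XX candidate x*(10^k+1) over all k-digit x, testing range membership; no str(), no division, no Gauss formula.
import Mathlib
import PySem

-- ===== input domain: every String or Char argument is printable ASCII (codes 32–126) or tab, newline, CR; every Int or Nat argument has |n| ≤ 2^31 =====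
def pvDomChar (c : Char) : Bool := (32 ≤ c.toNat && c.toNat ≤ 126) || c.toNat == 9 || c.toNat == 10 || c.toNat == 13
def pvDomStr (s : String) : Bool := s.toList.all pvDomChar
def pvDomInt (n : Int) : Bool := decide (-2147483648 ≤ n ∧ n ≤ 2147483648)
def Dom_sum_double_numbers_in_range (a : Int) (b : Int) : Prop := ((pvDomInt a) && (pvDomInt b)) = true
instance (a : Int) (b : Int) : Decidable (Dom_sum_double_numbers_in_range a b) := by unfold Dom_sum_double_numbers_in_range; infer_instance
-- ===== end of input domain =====

-- B replaces A's string-length-bounded closed-form series computation by direct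
-- enumeration of every XX candidate x*(10^k+1); a different algorithm of similar size
-- (B is O(sqrt b) per call where A is O(log b); equivalence of return values is proved).

-- ===== PORT A =====
-- 10**k is ported as 10 ^ k.toNat: exact, since k ranges over range(1, max_k+1), so 0 ≤ k-1 < k.
def sum_double_numbers_in_range (a : Int) (b : Int) : Int :=
  let len_b : Int := PySem.Str.len (PySem.Int.toStr b)
  let max_k : Int := PySem.Int.floordiv len_b 2
  (PySem.List.pyRange 1 (max_k + 1)).foldl (fun total k =>
    let M : Int := 10 ^ k.toNat + 1
    let x_min_val : Int := -(PySem.Int.floordiv (-a) M)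
    let x_max_val : Int := PySem.Int.floordiv b M
    let x_min_digits : Int := 10 ^ (k - 1).toNat
    let x_max_digits : Int := 10 ^ k.toNat - 1
    let low := max x_min_val x_min_digits
    let high := min x_max_val x_max_digits
    if low ≤ high then
      let count := high - low + 1
      let sum_X := PySem.Int.floordiv ((low + high) * count) 2
      total + sum_X * M
    else total) 0

-- ===== PORT B =====
-- The while loop of Source B; j + 1 plays the role of Python's loop variable k (k starts at 1
-- and only increases, so representing it as j + 1 with j : Nat is exact).
def sumDoubleAltLoop (a : Int) (b : Int) (j : Nat) (total : Int) : Int :=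
  if 10 ^ j * ((10 : Int) ^ (j + 1) + 1) ≤ b then
    let m : Int := 10 ^ (j + 1) + 1
    let total' := (PySem.List.pyRange ((10 : Int) ^ j) ((10 : Int) ^ (j + 1))).foldl
      (fun t x => if a ≤ x * m ∧ x * m ≤ b then t + x * m else t) total
    sumDoubleAltLoop a b (j + 1) total'
  else total
termination_by (b + 1 - 10 ^ j).toNat
decreasing_by
  have hp1 : (1 : Int) ≤ 10 ^ j := one_le_pow₀ (by norm_num)
  have hq : (10 : Int) ^ (j + 1) = 10 * 10 ^ j := by rw [pow_succ]; ring
  have hb : (10 : Int) ^ j ≤ b := by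
    calc (10 : Int) ^ j = 10 ^ j * 1 := by ring
    _ ≤ 10 ^ j * ((10 : Int) ^ (j + 1) + 1) := by
        apply mul_le_mul_of_nonneg_left _ (by positivity)
        nlinarith [hp1]
    _ ≤ b := by assumption
  omega

def sum_double_numbers_in_range_alt (a : Int) (b : Int) : Int :=
  sumDoubleAltLoop a b 0 0

-- ===== PRECONDITION & SPEC =====
def Spec_sum_double_numbers_in_range (a : Int) (b : Int) (out : Int) : Prop := out = sum_double_numbers_in_range_alt a b
instance (a : Int) (b : Int) (out : Int) : Decidable (Spec_sum_double_numbers_in_range a b out) := by unfold Spec_sum_double_numbers_in_range; infer_instance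

-- ===== CLAIM (what is proved, stated in full; the proofs are below) =====
def Claim_equal_sum_double_numbers_in_range : Prop := ∀ (a : Int) (b : Int), Dom_sum_double_numbers_in_range a b → Spec_sum_double_numbers_in_range a b (sum_double_numbers_in_range a b)

-- ===== LEMMAS AND PROOFS =====

-- The k-th summand of A's loop (k is Python's loop variable, an integer ≥ 1).
def sdTerm (a b k : Int) : Int :=
  let M : Int := 10 ^ k.toNat + 1
  let low := max (-(PySem.Int.floordiv (-a) M)) (10 ^ (k - 1).toNat)
  let high := min (PySem.Int.floordiv b M) (10 ^ k.toNat - 1)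
  if low ≤ high then PySem.Int.floordiv ((low + high) * (high - low + 1)) 2 * M else 0

-- Sum of the integers in [p, q].
def iSum (p q : Int) : Int :=
  if _h : p ≤ q then p + iSum (p + 1) q else 0
termination_by (q + 1 - p).toNat
decreasing_by omega

lemma iSum_of_gt (p q : Int) (h : q < p) : iSum p q = 0 := by
  rw [iSum, dif_neg (by omega : ¬ p ≤ q)]

lemma iSum_step (p q : Int) (h : p ≤ q) : iSum p q = p + iSum (p + 1) q := by
  rw [iSum, dif_pos h]

lemma two_mul_iSum (p q : Int) : 2 * iSum p q = if p ≤ q then (p + q) * (q - p + 1) else 0 := by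
  have key : ∀ (n : Nat) (p q : Int), (q + 1 - p).toNat = n →
      2 * iSum p q = if p ≤ q then (p + q) * (q - p + 1) else 0 := by
    intro n
    induction n with
    | zero => intro p q hn; rw [iSum_of_gt p q (by omega), if_neg (by omega)]; ring
    | succ n ih =>
      intro p q hn
      have h : p ≤ q := by omega
      rw [iSum_step p q h, if_pos h, mul_add, ih (p + 1) q (by omega)]
      split_ifs with h2
      · have e1 : (p + q) * (q - p + 1) = (p + 1 + q) * (q - (p + 1) + 1) + 2 * p := by ring
        linarith
      · have hq : q = p := by omega
        subst hq; ring
  exact key (q + 1 - p).toNat p q rfl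

-- The inner for-loop of B sums x*M over the x in [lo, hi) satisfying L ≤ x ≤ H.
lemma foldl_band (M L H : Int)
    (a b : Int)
    (hL : ∀ x : Int, L ≤ x ↔ a ≤ x * M) (hH : ∀ x : Int, x ≤ H ↔ x * M ≤ b) :
    ∀ (n : Nat) (lo hi t : Int), (hi - lo).toNat = n →
    (PySem.List.pyRange lo hi).foldl
      (fun t x => if a ≤ x * M ∧ x * M ≤ b then t + x * M else t) t
    = t + iSum (max lo L) (min (hi - 1) H) * M := by
  intro n
  induction n with
  | zero =>
    intro lo hi t hn
    rw [PySem.List.pyRange_one_eq_nil (by omega)]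
    rw [iSum_of_gt _ _ (by omega)]
    simp
  | succ n ih =>
    intro lo hi t hn
    rw [PySem.List.pyRange_one_cons (by omega : lo < hi), List.foldl_cons]
    rw [ih (lo + 1) hi _ (by omega)]
    have hcond : (a ≤ lo * M ∧ lo * M ≤ b) ↔ (L ≤ lo ∧ lo ≤ H) := by
      rw [hL lo, hH lo]
    split_ifs with hc
    · obtain ⟨h1, h2⟩ := hcond.mp hc
      have e1 : max lo L = lo := by omega
      have e2 : max (lo + 1) L = lo + 1 := by omega
      have e3 : lo ≤ min (hi - 1) H := by omega
      rw [e1, e2, iSum_step lo _ e3]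
      ring
    · have hnc := hcond.not.mp hc
      rcases not_and_or.mp hnc with h1 | h1
      · have e1 : max lo L = max (lo + 1) L := by omega
        rw [e1]
      · rw [iSum_of_gt (max lo L) _ (by omega),
            iSum_of_gt (max (lo + 1) L) _ (by omega)]

-- B's inner loop for Python k = j+1 computes exactly A's k-th summand.
lemma inner_eq_term (a b : Int) (j : Nat) (t : Int) :
    (PySem.List.pyRange ((10 : Int) ^ j) ((10 : Int) ^ (j + 1))).foldl
      (fun t x => if a ≤ x * ((10 : Int) ^ (j + 1) + 1) ∧ x * ((10 : Int) ^ (j + 1) + 1) ≤ b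
                  then t + x * ((10 : Int) ^ (j + 1) + 1) else t) t
    = t + sdTerm a b ((j : Int) + 1) := by
  have hM : (0 : Int) < 10 ^ (j + 1) + 1 := by positivity
  rw [foldl_band ((10 : Int) ^ (j + 1) + 1)
        (-(PySem.Int.floordiv (-a) ((10 : Int) ^ (j + 1) + 1)))
        (PySem.Int.floordiv b ((10 : Int) ^ (j + 1) + 1)) a b
        ?_ ?_ (((10 : Int) ^ (j + 1) - (10 : Int) ^ j).toNat) _ _ t rfl]
  · have e1 : (((j : Int) + 1)).toNat = j + 1 := by omega
    have e2 : (((j : Int) + 1) - 1).toNat = j := by omega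
    simp only [sdTerm, e1, e2]
    rw [max_comm ((10 : Int) ^ j) (-(PySem.Int.floordiv (-a) ((10 : Int) ^ (j + 1) + 1))),
        min_comm ((10 : Int) ^ (j + 1) - 1) (PySem.Int.floordiv b ((10 : Int) ^ (j + 1) + 1))]
    set low := max (-(PySem.Int.floordiv (-a) ((10 : Int) ^ (j + 1) + 1))) ((10 : Int) ^ j)
    set high := min (PySem.Int.floordiv b ((10 : Int) ^ (j + 1) + 1)) ((10 : Int) ^ (j + 1) - 1)
    by_cases hlh : low ≤ high
    · rw [if_pos hlh]
      congr 2
      have h2 := two_mul_iSum low high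
      rw [if_pos hlh] at h2
      rw [← h2, PySem.Int.floordiv_eq_ediv_of_pos (by norm_num)]
      omega
    · rw [if_neg hlh, iSum_of_gt _ _ (by omega), zero_mul]
  · intro x
    have h := PySem.Int.le_floordiv_iff_mul_le (a := -a) (b := (10 : Int) ^ (j + 1) + 1) (q := -x) hM
    rw [neg_mul] at h
    constructor
    · intro hx; have := h.mp (by omega); linarith
    · intro hx; have := h.mpr (by linarith); omega
  · intro x
    exact PySem.Int.le_floordiv_iff_mul_le hM

-- A's k-th summand vanishes as soon as b is below the least XX number with 2k digits.
lemma sdTerm_zero (a b k : Int)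
    (hb : b < 10 ^ (k - 1).toNat * (10 ^ k.toNat + 1)) : sdTerm a b k = 0 := by
  have hM : (0 : Int) < 10 ^ k.toNat + 1 := by positivity
  have hH : PySem.Int.floordiv b (10 ^ k.toNat + 1) < 10 ^ (k - 1).toNat :=
    (PySem.Int.floordiv_lt_iff_lt_mul hM).mpr hb
  simp only [sdTerm]
  rw [if_neg (by omega)]

-- Monotonicity of the least XX number with 2k digits.
lemma least_xx_mono (i j : Nat) (h : i ≤ j) :
    (10 : Int) ^ i * (10 ^ (i + 1) + 1) ≤ 10 ^ j * (10 ^ (j + 1) + 1) := by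
  have h1 : (10 : Int) ^ i ≤ 10 ^ j := pow_le_pow_right₀ (by norm_num) h
  have h2 : (10 : Int) ^ (i + 1) ≤ 10 ^ (j + 1) := pow_le_pow_right₀ (by norm_num) (by omega)
  have h3 : (0 : Int) < 10 ^ i := by positivity
  have h4 : (0:Int) ≤ 10 ^ (i+1) + 1 := by positivity
  exact mul_le_mul h1 (by linarith) h4 (by positivity)

-- Decimal digit strings: n < 10 ^ (number of digits of n).
lemma toDigitsCore_lt_pow (f : Nat) :
    ∀ (n : Nat) (l : List Char), n < f →
      n < 10 ^ ((Nat.toDigitsCore 10 f n l).length - l.length) := by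
  induction f with
  | zero => intro n l h; omega
  | succ f ih =>
    intro n l h
    rw [Nat.toDigitsCore]
    by_cases h0 : n / 10 = 0
    · rw [if_pos h0]
      simp only [List.length_cons]
      have e1 : l.length + 1 - l.length = 1 := by omega
      rw [e1]
      omega
    · rw [if_neg h0]
      have h1 := ih (n / 10) (Nat.digitChar (n % 10) :: l) (by omega)
      simp only [List.length_cons] at h1
      set L := (Nat.toDigitsCore 10 f (n / 10) (Nat.digitChar (n % 10) :: l)).length with hL
      have e1 : L - (l.length + 1) = L - l.length - 1 := by omega
      rw [e1] at h1
      rcases Nat.eq_zero_or_pos (L - l.length) with hz | hp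
      · rw [hz] at h1; simp at h1; omega
      · have e2 : L - l.length = (L - l.length - 1) + 1 := by omega
        rw [e2, pow_succ]
        omega

lemma int_lt_pow_len (b : Int) (hb : 0 ≤ b) :
    b < (10 : Int) ^ (PySem.Int.toChars b).length := by
  have hc : PySem.Int.toChars b = Nat.toDigits 10 b.toNat := by
    simp [PySem.Int.toChars]; omega
  rw [hc, Nat.toDigits]
  have h1 := toDigitsCore_lt_pow (b.toNat + 1) b.toNat [] (by omega)
  simp only [List.length_nil, Nat.sub_zero] at h1
  exact_mod_cast (by omega : b ≤ (b.toNat : Int)).trans_lt (by exact_mod_cast h1)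

lemma len_le_eleven (b : Int) (h1 : -2147483648 ≤ b) (h2 : b ≤ 2147483648) :
    (PySem.Int.toChars b).length ≤ 11 := by
  by_cases hb : 0 ≤ b
  · have hc : PySem.Int.toChars b = Nat.toDigits 10 b.toNat := by
      simp [PySem.Int.toChars]; omega
    rw [hc]
    have := Nat.toDigits_length 10 b.toNat 10 (by norm_num) (by norm_num; omega)
    omega
  · replace hb : b < 0 := by omega
    have hc : PySem.Int.toChars b = '-' :: Nat.toDigits 10 b.natAbs := by
      simp [PySem.Int.toChars, hb]
    rw [hc, List.length_cons]
    have := Nat.toDigits_length 10 b.natAbs 10 (by norm_num) (by norm_num; omega)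
    omega

-- B's loop sums A's summands for Python k = j+1 .. 6.
lemma altLoop_eq (a b : Int) (hb : b ≤ 2147483648) :
    ∀ (j : Nat) (t : Int), sumDoubleAltLoop a b j t
      = t + ((PySem.List.pyRange ((j : Int) + 1) 7).map (sdTerm a b)).sum := by
  have hzero : ∀ (j : Nat), b < 10 ^ j * ((10 : Int) ^ (j + 1) + 1) →
      ((PySem.List.pyRange ((j : Int) + 1) 7).map (sdTerm a b)).sum = 0 := by
    intro j hj
    apply List.sum_eq_zero
    intro x hx
    obtain ⟨k, hk, rfl⟩ := List.mem_map.mp hx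
    rw [PySem.List.mem_pyRange_one] at hk
    apply sdTerm_zero a b k
    have hm := least_xx_mono j (k - 1).toNat (by omega)
    have he : (k - 1).toNat + 1 = k.toNat := by omega
    rw [he] at hm
    omega
  have key : ∀ (n : Nat) (j : Nat) (t : Int), 7 - j = n → sumDoubleAltLoop a b j t
      = t + ((PySem.List.pyRange ((j : Int) + 1) 7).map (sdTerm a b)).sum := by
    intro n
    induction n with
    | zero =>
      intro j t hn
      have hj : 6 ≤ j := by omega
      have hc : ¬ 10 ^ j * ((10 : Int) ^ (j + 1) + 1) ≤ b := by
        have h1 := least_xx_mono 6 j hj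
        norm_num at h1
        omega
      rw [sumDoubleAltLoop, if_neg hc, hzero j (by omega)]
      ring
    | succ n ih =>
      intro j t hn
      by_cases hc : 10 ^ j * ((10 : Int) ^ (j + 1) + 1) ≤ b
      · have step : sumDoubleAltLoop a b j t = sumDoubleAltLoop a b (j + 1)
            ((PySem.List.pyRange ((10 : Int) ^ j) ((10 : Int) ^ (j + 1))).foldl
              (fun t x => if a ≤ x * ((10 : Int) ^ (j + 1) + 1) ∧
                  x * ((10 : Int) ^ (j + 1) + 1) ≤ b
                then t + x * ((10 : Int) ^ (j + 1) + 1) else t) t) := by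
          rw [sumDoubleAltLoop, if_pos hc]
        rw [step, inner_eq_term, ih (j + 1) _ (by omega)]
        have hlt : ((j : Int) + 1) < 7 := by
          by_contra hj
          have h1 := least_xx_mono 6 j (by omega)
          norm_num at h1
          omega
        rw [PySem.List.pyRange_one_cons hlt, List.map_cons, List.sum_cons]
        push_cast
        ring_nf
      · rw [sumDoubleAltLoop, if_neg hc, hzero j (by omega)]
        ring
  intro j t
  exact key (7 - j) j t rfl

-- ===== VERDICT (by name: the statement is the Claim_ definition above) =====
lemma A_eq_sum (a b : Int) :
    sum_double_numbers_in_range a b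
      = ((PySem.List.pyRange 1
          (PySem.Int.floordiv (PySem.Str.len (PySem.Int.toStr b)) 2 + 1)).map (sdTerm a b)).sum := by
  have step : sum_double_numbers_in_range a b
      = (PySem.List.pyRange 1
          (PySem.Int.floordiv (PySem.Str.len (PySem.Int.toStr b)) 2 + 1)).foldl
        (fun total k =>
          if max (-(PySem.Int.floordiv (-a) (10 ^ k.toNat + 1))) (10 ^ (k - 1).toNat)
              ≤ min (PySem.Int.floordiv b (10 ^ k.toNat + 1)) (10 ^ k.toNat - 1) then
            total + PySem.Int.floordiv
              ((max (-(PySem.Int.floordiv (-a) (10 ^ k.toNat + 1))) (10 ^ (k - 1).toNat)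
                  + min (PySem.Int.floordiv b (10 ^ k.toNat + 1)) (10 ^ k.toNat - 1))
                * (min (PySem.Int.floordiv b (10 ^ k.toNat + 1)) (10 ^ k.toNat - 1)
                  - max (-(PySem.Int.floordiv (-a) (10 ^ k.toNat + 1))) (10 ^ (k - 1).toNat) + 1)) 2
              * (10 ^ k.toNat + 1)
          else total) 0 := by
    rw [sum_double_numbers_in_range]
  rw [step, PySem.List.foldl_congr_mem _ _ (fun (t k : Int) => t + sdTerm a b k) 0 ?_]
  · rw [PySem.List.foldl_add]; simp
  · intro acc k _
    simp only [sdTerm]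
    split_ifs <;> ring

-- ===== VERDICT (by name: the statement is the Claim_ definition above) =====
theorem sum_double_numbers_in_range_spec : Claim_equal_sum_double_numbers_in_range := by
  intro a b hdom
  simp only [Dom_sum_double_numbers_in_range, pvDomInt, Bool.and_eq_true, decide_eq_true_eq] at hdom
  obtain ⟨-, hb1, hb2⟩ := hdom
  unfold Spec_sum_double_numbers_in_range sum_double_numbers_in_range_alt
  rw [A_eq_sum, altLoop_eq a b hb2 0 0]
  rw [PySem.Str.len_eq, PySem.Int.toList_toStr,
      PySem.Int.floordiv_eq_ediv_of_pos (by norm_num)]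
  have hlen := len_le_eleven b hb1 hb2
  set len := (PySem.Int.toChars b).length with hlendef
  have hmk0 : 0 ≤ ((len : Int)) / 2 := by omega
  have hmk5 : ((len : Int)) / 2 ≤ 5 := by omega
  have hsplit := PySem.List.pyRange_one_append 1 ((len : Int) / 2 + 1) 7 (by omega) (by omega)
  have e0 : (((0 : Nat) : Int) + 1) = 1 := by norm_num
  rw [e0, hsplit, List.map_append, List.sum_append]
  have htail : ∀ x ∈ (PySem.List.pyRange ((len : Int) / 2 + 1) 7).map (sdTerm a b), x = 0 := by
    intro x hx
    obtain ⟨k, hk, rfl⟩ := List.mem_map.mp hx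
    rw [PySem.List.mem_pyRange_one] at hk
    apply sdTerm_zero a b k
    by_cases hbneg : b < 0
    · have : (0 : Int) < 10 ^ (k - 1).toNat * (10 ^ k.toNat + 1) := by positivity
      omega
    · have hblt := int_lt_pow_len b (by omega)
      rw [← hlendef] at hblt
      have hle : len ≤ 2 * k.toNat - 1 := by omega
      have h1 : (10 : Int) ^ len ≤ 10 ^ (2 * k.toNat - 1) := pow_le_pow_right₀ (by norm_num) hle
      have h2 : (10 : Int) ^ (2 * k.toNat - 1) = 10 ^ (k - 1).toNat * 10 ^ k.toNat := by
        rw [← pow_add]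
        congr 1
        omega
    --  b < 10^(k-1)*10^k ≤ 10^(k-1)*(10^k+1)
      have h3 : (10 : Int) ^ (k - 1).toNat * 10 ^ k.toNat
          ≤ 10 ^ (k - 1).toNat * (10 ^ k.toNat + 1) := by
        apply mul_le_mul_of_nonneg_left (by omega) (by positivity)
      omega
  rw [List.sum_eq_zero htail]
  ring
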